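-- pv_equiv track=rewrite | github.com/masaki-sakata/EntityTree | scripts/eval_tree.py | _compute_leaf_sets
-- ===== SOURCE A (Python) =====
-- from typing import Dict, Set, List, Tuple, Optional, Union
--
-- def _compute_leaf_sets(adjacency: Dict[int, List[int]], n_leaves: int) -> Dict[int, Set[int]]:
--     """
--     Compute and memoize the leaf set under each node.
--     Leaves are [0 .. n_leaves-1]. Non-listed nodes simply have empty children.
--     """
--     memo: Dict[int, Set[int]] = {}
--
--     # Collect all nodes that appear anywhere
--     nodes = set(adjacency.keys()) | {c for cs in adjacency.values() for c in cs} | set(range(n_leaves))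
--
--     def dfs(u: int) -> Set[int]:
--         if u in memo:
--             return memo[u]
--         if u < n_leaves:
--             memo[u] = {u}
--             return memo[u]
--         s: Set[int] = set()
--         for v in adjacency.get(u, []):
--             s |= dfs(v)
--         memo[u] = s
--         return s
--
--     for node in nodes:
--         dfs(node)
--     return memo
-- ===== SOURCE B (Python) =====
-- def _compute_leaf_sets(adjacency, n_leaves):
--     """Iterative two-phase (push/resolve) post-order traversal with an explicit
--     stack instead of recursion; detects a cycle instead of overflowing."""
--     memo = {}
--     nodes = set(adjacency.keys()) | {c for cs in adjacency.values() for c in cs} | set(range(n_leaves))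
--     for node in nodes:
--         if node in memo:
--             continue
--         stack = [(node, False)]
--         pending = set()
--         while stack:
--             u, ready = stack.pop()
--             if ready:
--                 s = set()
--                 for v in adjacency.get(u, []):
--                     s |= memo[v]
--                 memo[u] = s
--                 pending.discard(u)
--             elif u in memo:
--                 continue
--             elif u in pending:
--                 raise ValueError("cyclic adjacency")
--             elif u < n_leaves:
--                 memo[u] = {u}
--             else:
--                 stack.append((u, True))
--                 pending.add(u)
--                 for v in reversed(adjacency.get(u, [])):
--                     stack.append((v, False))
--     return memo
-- ===== Notes on version B (the rewrite author's own statement) =====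
-- stated objective: alternative
-- what changed: The recursive memoized DFS is replaced by an explicit iterative two-phase (push children / resolve union) stack traversal that detects cycles instead of overflowing the call stack.
import Mathlib
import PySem

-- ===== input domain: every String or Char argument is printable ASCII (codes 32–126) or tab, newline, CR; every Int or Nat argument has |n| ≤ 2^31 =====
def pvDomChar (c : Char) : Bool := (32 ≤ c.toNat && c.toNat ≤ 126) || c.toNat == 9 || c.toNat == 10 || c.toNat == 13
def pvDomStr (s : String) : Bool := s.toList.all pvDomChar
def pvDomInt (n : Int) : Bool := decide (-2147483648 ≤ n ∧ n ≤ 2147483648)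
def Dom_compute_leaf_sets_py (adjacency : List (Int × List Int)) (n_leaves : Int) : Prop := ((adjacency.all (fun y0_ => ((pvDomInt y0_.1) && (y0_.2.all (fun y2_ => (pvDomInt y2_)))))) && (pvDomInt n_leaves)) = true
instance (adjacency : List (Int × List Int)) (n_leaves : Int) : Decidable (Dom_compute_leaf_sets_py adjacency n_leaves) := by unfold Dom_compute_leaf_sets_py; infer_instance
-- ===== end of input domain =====

-- B replaces A's recursive memoized DFS by an explicit two-phase (push/resolve) stack
-- traversal with cycle detection; same return value on every acyclic input (objective: alternative).

-- ===== PORT A =====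
-- shared literal pieces of the Python source (both programs execute these same lines):
-- the dict `adjacency` (first binding wins, matching the tester's assoc-list reading)
def pvAdj (adjacency : List (Int × List Int)) : PySem.Dict Int (List Int) :=
  PySem.Dict.mk adjacency

-- adjacency.get(u, [])
def pvChildren (adjacency : List (Int × List Int)) (u : Int) : List Int :=
  (pvAdj adjacency).getD u []

-- nodes = set(adjacency.keys()) | {c for cs in adjacency.values() for c in cs} | set(range(n_leaves))
def pvNodes (adjacency : List (Int × List Int)) (n_leaves : Int) : List Int :=
  PySem.Set.union
    (PySem.Set.union (PySem.Set.ofList ((pvAdj adjacency).keys))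
      (PySem.Set.ofList ((pvAdj adjacency).values.flatten)))
    (PySem.Set.ofList (PySem.List.pyRange 0 n_leaves))

-- fuel bounds (guards that make the recursions total; on Pre_ they are never exhausted)
def pvMaxRow (adjacency : List (Int × List Int)) : Nat :=
  adjacency.foldr (fun p m => max p.2.length m) 0

def pvFuelA (adjacency : List (Int × List Int)) : Nat :=
  (pvMaxRow adjacency + 2) ^ (adjacency.length + 2)

-- def dfs(u): literal recursion of A (fuel is only a totality guard; none = fuel ran out,
-- which Pre_ rules out).  goA is the `for v in adjacency.get(u, []): s |= dfs(v)` loop;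
-- dfs's returned set is the entry the returned memo holds at the visited key.
mutual
def dfsA (adjacency : List (Int × List Int)) (n_leaves : Int) :
    Nat → Int → PySem.Dict Int (List Int) → Option (PySem.Dict Int (List Int))
  | 0, _, _ => none
  | fuel + 1, u, memo =>
    if memo.contains u then some memo
    else if u < n_leaves then some (memo.insert u [u])
    else
      match goA adjacency n_leaves fuel (pvChildren adjacency u) memo [] with
      | none => none
      | some (m, s) => some (m.insert u s)

def goA (adjacency : List (Int × List Int)) (n_leaves : Int) :
    Nat → List Int → PySem.Dict Int (List Int) → PySem.Set Int →
    Option (PySem.Dict Int (List Int) × PySem.Set Int)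
  | _, [], memo, s => some (memo, s)
  | 0, _ :: _, _, _ => none
  | fuel + 1, v :: vs, memo, s =>
    match dfsA adjacency n_leaves fuel v memo with
    | none => none
    | some m2 => goA adjacency n_leaves fuel vs m2 (PySem.Set.union s (m2.getD v []))
end

-- for node in nodes: dfs(node);  return memo
def compute_leaf_sets_py (adjacency : List (Int × List Int)) (n_leaves : Int) : List (Int × List Int) :=
  match (pvNodes adjacency n_leaves).foldl
      (fun acc node => acc.bind (fun memo => dfsA adjacency n_leaves (pvFuelA adjacency) node memo))
      (some PySem.Dict.empty) with
  | some m => m.items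
  | none => []

-- ===== PORT B =====
def pvFuelB (adjacency : List (Int × List Int)) : Nat :=
  (pvMaxRow adjacency + 2) ^ (adjacency.length + 3)

-- s = set(); for v in adjacency.get(u, []): s |= memo[v]   (none = KeyError)
def collectB (memo : PySem.Dict Int (List Int)) :
    List Int → PySem.Set Int → Option (PySem.Set Int)
  | [], s => some s
  | v :: vs, s =>
    match memo.get? v with
    | none => none
    | some w => collectB memo vs (PySem.Set.union s w)

-- the `while stack:` loop of B.  Python pushes (u,True) then the children reversed and
-- pops from the END; the head of this list is that end, so pushing is consing the
-- children in order in front of (u, true).  none = fuel guard ran out or B raised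
-- (ValueError on a cycle, KeyError on a missing child entry); Pre_ rules both out.
def runB (adjacency : List (Int × List Int)) (n_leaves : Int) :
    Nat → List (Int × Bool) → PySem.Set Int → PySem.Dict Int (List Int) →
    Option (PySem.Dict Int (List Int))
  | 0, _, _, _ => none
  | _ + 1, [], _, memo => some memo
  | fuel + 1, (u, ready) :: st, pending, memo =>
    if ready then
      match collectB memo (pvChildren adjacency u) [] with
      | none => none
      | some s =>
          runB adjacency n_leaves fuel st (PySem.Set.discard pending u) (memo.insert u s)
    else if memo.contains u then runB adjacency n_leaves fuel st pending memo
    else if pending.contains u then none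
    else if u < n_leaves then runB adjacency n_leaves fuel st pending (memo.insert u [u])
    else
      runB adjacency n_leaves fuel
        ((pvChildren adjacency u).map (fun v => (v, false)) ++ (u, true) :: st)
        (PySem.Set.add pending u) memo

-- for node in nodes: if node in memo: continue; <stack loop>;  return memo
def compute_leaf_sets_py_alt (adjacency : List (Int × List Int)) (n_leaves : Int) : List (Int × List Int) :=
  match (pvNodes adjacency n_leaves).foldl
      (fun acc node => acc.bind (fun memo =>
        if memo.contains node then some memo
        else runB adjacency n_leaves (pvFuelB adjacency) [(node, false)] [] memo))
      (some PySem.Dict.empty) with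
  | some m => m.items
  | none => []

-- ===== PRECONDITION & SPEC =====
-- v is an "internal" node: a key of adjacency that is not treated as a leaf
abbrev pvInternal (adjacency : List (Int × List Int)) (n_leaves : Int) (v : Int) : Prop :=
  v ∈ adjacency.map Prod.fst ∧ n_leaves ≤ v

-- bounded reachability along edges internal node → child (A only ever recurses out of
-- internal nodes: leaves and unlisted nodes return at once)
def pvReachB (adjacency : List (Int × List Int)) (n_leaves : Int) :
    Nat → Int → Int → Bool
  | 0, u, v => u == v
  | n + 1, u, v =>
    u == v ||
      (decide (pvInternal adjacency n_leaves u) &&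
        (pvChildren adjacency u).any (fun w => pvReachB adjacency n_leaves n w v))

-- Pre_ = the graph on internal nodes is acyclic (no child of an internal node reaches back
-- to its parent; |adjacency| steps suffice, since a shortest cycle repeats no key).  It
-- excludes exactly the cyclic inputs, on which A's unguarded recursion raises
-- RecursionError (and B raises ValueError); on every acyclic input A returns and B matches.
def Pre_compute_leaf_sets_py (adjacency : List (Int × List Int)) (n_leaves : Int) : Prop :=
  ∀ p ∈ adjacency, ∀ v ∈ pvChildren adjacency p.1,
    pvInternal adjacency n_leaves p.1 → pvInternal adjacency n_leaves v →
      pvReachB adjacency n_leaves adjacency.length v p.1 = false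

instance (adjacency : List (Int × List Int)) (n_leaves : Int) :
    Decidable (Pre_compute_leaf_sets_py adjacency n_leaves) := by
  unfold Pre_compute_leaf_sets_py; infer_instance

def pvWitness_compute_leaf_sets_py : (List (Int × List Int)) × Int :=
  ([(2, [0, 1]), (3, [2, 0])], 2)

def Spec_compute_leaf_sets_py (adjacency : List (Int × List Int)) (n_leaves : Int) (out : List (Int × List Int)) : Prop := out = compute_leaf_sets_py_alt adjacency n_leaves
instance (adjacency : List (Int × List Int)) (n_leaves : Int) (out : List (Int × List Int)) : Decidable (Spec_compute_leaf_sets_py adjacency n_leaves out) := by unfold Spec_compute_leaf_sets_py; infer_instance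

-- ===== CLAIM (what is proved, stated in full; the proofs are below) =====
def Claim_equal_compute_leaf_sets_py : Prop := ∀ (adjacency : List (Int × List Int)) (n_leaves : Int), Dom_compute_leaf_sets_py adjacency n_leaves → Pre_compute_leaf_sets_py adjacency n_leaves → Spec_compute_leaf_sets_py adjacency n_leaves (compute_leaf_sets_py adjacency n_leaves)

-- ===== LEMMAS AND PROOFS =====

theorem pv_witness_ok :
    Dom_compute_leaf_sets_py pvWitness_compute_leaf_sets_py.1 pvWitness_compute_leaf_sets_py.2 ∧
    Pre_compute_leaf_sets_py pvWitness_compute_leaf_sets_py.1 pvWitness_compute_leaf_sets_py.2 := by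
  constructor <;> decide

-- explicit edge chains: pvChain u ws v = "ws is the node sequence of a walk u → … → v"
def pvChain (adjacency : List (Int × List Int)) (n_leaves : Int) :
    Int → List Int → Int → Prop
  | u, [], v => u = v
  | u, w :: ws, v =>
    pvInternal adjacency n_leaves u ∧ w ∈ pvChildren adjacency u ∧
      pvChain adjacency n_leaves w ws v

theorem pvReachB_refl (adjacency : List (Int × List Int)) (n_leaves : Int)
    (n : Nat) (u : Int) : pvReachB adjacency n_leaves n u u = true := by
  cases n <;> simp [pvReachB]

theorem chain_of_reachB (adjacency : List (Int × List Int)) (n_leaves : Int) :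
    ∀ (n : Nat) (u v : Int), pvReachB adjacency n_leaves n u v = true →
      ∃ ws : List Int, ws.length ≤ n ∧ pvChain adjacency n_leaves u ws v := by
  intro n
  induction n with
  | zero =>
    intro u v h
    simp only [pvReachB, beq_iff_eq] at h
    exact ⟨[], by simp, h⟩
  | succ n ih =>
    intro u v h
    simp only [pvReachB, Bool.or_eq_true, beq_iff_eq, Bool.and_eq_true,
      List.any_eq_true, decide_eq_true_eq] at h
    rcases h with rfl | ⟨hint, w, hw, hr⟩
    · exact ⟨[], by simp, rfl⟩
    · obtain ⟨ws, hlen, hch⟩ := ih w v hr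
      exact ⟨w :: ws, by simp; omega, hint, hw, hch⟩

theorem reachB_of_chain (adjacency : List (Int × List Int)) (n_leaves : Int) :
    ∀ (ws : List Int) (u v : Int) (n : Nat), ws.length ≤ n →
      pvChain adjacency n_leaves u ws v → pvReachB adjacency n_leaves n u v = true := by
  intro ws
  induction ws with
  | nil =>
    intro u v n _ h
    obtain rfl : u = v := h
    exact pvReachB_refl adjacency n_leaves n u
  | cons w ws ih =>
    intro u v n hlen h
    obtain ⟨hint, hw, hch⟩ := h
    obtain ⟨m, rfl⟩ : ∃ m, n = m + 1 := ⟨n - 1, by simp at hlen; omega⟩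
    simp only [pvReachB, Bool.or_eq_true, Bool.and_eq_true, List.any_eq_true,
      decide_eq_true_eq]
    exact Or.inr ⟨hint, w, hw, ih w v m (by simp at hlen; omega) hch⟩

-- every node along a chain is internal, except possibly the endpoint
theorem chain_mem_internal (adjacency : List (Int × List Int)) (n_leaves : Int) :
    ∀ (ws : List Int) (u v : Int), pvChain adjacency n_leaves u ws v →
      ∀ x ∈ ws, pvInternal adjacency n_leaves x ∨ x = v := by
  intro ws
  induction ws with
  | nil => intro u v _ x hx; cases hx
  | cons w ws ih =>
    intro u v h x hx
    obtain ⟨-, -, hch⟩ := h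
    rcases List.mem_cons.1 hx with rfl | hx
    · cases ws with
      | nil => exact Or.inr hch
      | cons a ws' => exact Or.inl hch.1
    · exact ih w v hch x hx

-- a chain can be restarted at any of its nodes, keeping a suffix
theorem chain_suffix (adjacency : List (Int × List Int)) (n_leaves : Int) :
    ∀ (ws : List Int) (u v : Int), pvChain adjacency n_leaves u ws v →
      ∀ x ∈ u :: ws, ∃ l, pvChain adjacency n_leaves x l v ∧ (x :: l) <:+ (u :: ws) := by
  intro ws
  induction ws with
  | nil =>
    intro u v h x hx
    obtain rfl : x = u := by simpa using hx
    exact ⟨[], h, List.suffix_refl _⟩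
  | cons w ws ih =>
    intro u v h x hx
    obtain ⟨hint, hw, hch⟩ := h
    rcases List.mem_cons.1 hx with rfl | hx
    · exact ⟨w :: ws, ⟨hint, hw, hch⟩, List.suffix_refl _⟩
    · obtain ⟨l, hc, hs⟩ := ih w v hch x hx
      exact ⟨l, hc, hs.trans (List.suffix_cons _ _)⟩

-- any chain shortens to one whose node sequence has no repeats
theorem chain_shorten (adjacency : List (Int × List Int)) (n_leaves : Int) :
    ∀ (ws : List Int) (u v : Int), pvChain adjacency n_leaves u ws v →
      ∃ ws', pvChain adjacency n_leaves u ws' v ∧ (u :: ws').Nodup := by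
  intro ws
  induction ws with
  | nil => intro u v h; exact ⟨[], h, List.nodup_singleton u⟩
  | cons w ws ih =>
    intro u v h
    obtain ⟨hint, hw, hch⟩ := h
    obtain ⟨ws'', hc'', hn''⟩ := ih w v hch
    by_cases hu : u ∈ w :: ws''
    · obtain ⟨l, hc, hs⟩ := chain_suffix adjacency n_leaves ws'' w v hc'' u hu
      exact ⟨l, hc, (hs.sublist).nodup hn''⟩
    · exact ⟨w :: ws'', ⟨hint, hw, hc''⟩, List.nodup_cons.2 ⟨hu, hn''⟩⟩

-- a nodup list of keys of adjacency is no longer than adjacency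
theorem nodup_keys_length (adjacency : List (Int × List Int)) :
    ∀ l : List Int, l.Nodup → (∀ x ∈ l, x ∈ adjacency.map Prod.fst) →
      l.length ≤ adjacency.length := by
  intro l hnd hsub
  have h1 : l.toFinset.card = l.length := List.toFinset_card_of_nodup hnd
  have h2 : l.toFinset ⊆ (adjacency.map Prod.fst).toFinset := by
    intro x hx
    exact List.mem_toFinset.2 (hsub x (List.mem_toFinset.1 hx))
  calc l.length = l.toFinset.card := h1.symm
    _ ≤ (adjacency.map Prod.fst).toFinset.card := Finset.card_le_card h2
    _ ≤ (adjacency.map Prod.fst).length := List.toFinset_card_le _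
    _ = adjacency.length := List.length_map _

-- number of internal keys reachable from u: the well-founded measure the proofs recurse on
def pvMu (adjacency : List (Int × List Int)) (n_leaves : Int) (u : Int) : Nat :=
  (adjacency.map Prod.fst).countP
    (fun k => decide (pvInternal adjacency n_leaves k) &&
      pvReachB adjacency n_leaves adjacency.length u k)

theorem countP_lt_of_mem {l : List Int} {p q : Int → Bool}
    (h : ∀ x ∈ l, p x = true → q x = true) {u : Int} (hu : u ∈ l)
    (hpu : p u = false) (hqu : q u = true) : l.countP p < l.countP q := by
  induction l with
  | nil => cases hu
  | cons a l ih =>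
    simp only [List.countP_cons]
    rcases List.mem_cons.1 hu with rfl | hu'
    · have hle : l.countP p ≤ l.countP q :=
        List.countP_mono_left (fun x hx => h x (List.mem_cons_of_mem _ hx))
      rw [hpu, hqu]; simp; omega
    · have := ih (fun x hx hp => h x (List.mem_cons_of_mem _ hx) hp) hu'
      have hpa : p a = true → q a = true := h a (List.mem_cons_self ..)
      cases hqa : q a <;> cases hpa' : p a <;> simp_all
      omega

-- the key fact: under Pre_ an internal edge strictly decreases pvMu
theorem pvEdge_mu_lt (adjacency : List (Int × List Int)) (n_leaves : Int)
    (pre : Pre_compute_leaf_sets_py adjacency n_leaves) (u v : Int)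
    (hu : pvInternal adjacency n_leaves u) (hv : pvInternal adjacency n_leaves v)
    (hm : v ∈ pvChildren adjacency u) :
    pvMu adjacency n_leaves v < pvMu adjacency n_leaves u := by
  -- Pre_ applied to any row keyed u
  obtain ⟨p, hp, hp1⟩ : ∃ p ∈ adjacency, p.1 = u := by
    obtain ⟨p, hp, he⟩ := List.mem_map.1 hu.1
    exact ⟨p, hp, he⟩
  have hnr : pvReachB adjacency n_leaves adjacency.length v u = false := by
    have := pre p hp v (by rw [hp1]; exact hm) (by rw [hp1]; exact hu) hv
    rw [hp1] at this; exact this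
  -- pointwise monotonicity via chain shortening
  have hmono : ∀ k, pvInternal adjacency n_leaves k →
      pvReachB adjacency n_leaves adjacency.length v k = true →
      pvReachB adjacency n_leaves adjacency.length u k = true := by
    intro k hk hr
    obtain ⟨ws0, _, hch0⟩ := chain_of_reachB adjacency n_leaves adjacency.length v k hr
    have hch : pvChain adjacency n_leaves u (v :: ws0) k := ⟨hu, hm, hch0⟩
    obtain ⟨ws', hch', hnd⟩ := chain_shorten adjacency n_leaves (v :: ws0) u k hch
    have hsub : ∀ x ∈ u :: ws', x ∈ adjacency.map Prod.fst := by
      intro x hx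
      rcases List.mem_cons.1 hx with rfl | hx
      · exact hu.1
      · rcases chain_mem_internal adjacency n_leaves ws' u k hch' x hx with h | rfl
        · exact h.1
        · exact hk.1
    have hlen : (u :: ws').length ≤ adjacency.length := nodup_keys_length adjacency _ hnd hsub
    exact reachB_of_chain adjacency n_leaves ws' u k adjacency.length (by simp at hlen; omega) hch'
  -- strict counting
  unfold pvMu
  apply countP_lt_of_mem (u := u)
  · intro x hx hpx
    simp only [Bool.and_eq_true, decide_eq_true_eq] at hpx ⊢
    exact ⟨hpx.1, hmono x hpx.1 hpx.2⟩
  · exact hu.1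
  · rw [hnr]; simp
  · simp [hu, pvReachB_refl]

theorem pvMu_le_len (adjacency : List (Int × List Int)) (n_leaves u : Int) :
    pvMu adjacency n_leaves u ≤ adjacency.length := by
  unfold pvMu
  calc (adjacency.map Prod.fst).countP _ ≤ (adjacency.map Prod.fst).length :=
        List.countP_le_length
    _ = adjacency.length := List.length_map _

theorem children_row (adjacency : List (Int × List Int)) (u : Int)
    (h : pvChildren adjacency u ≠ []) : (u, pvChildren adjacency u) ∈ adjacency := by
  unfold pvChildren at *
  rw [PySem.Dict.getD_eq_get?_getD] at *
  cases hg : (pvAdj adjacency).get? u with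
  | none => rw [hg] at h; simp at h
  | some cs =>
    simp only [Option.getD_some]
    have := PySem.Dict.mem_items_of_get?_eq_some _ hg
    simpa [pvAdj] using this

theorem children_len_le (adjacency : List (Int × List Int)) (u : Int) :
    (pvChildren adjacency u).length ≤ pvMaxRow adjacency := by
  by_cases h : pvChildren adjacency u = []
  · simp [h]
  · have hmem := children_row adjacency u h
    unfold pvMaxRow
    generalize hcs : pvChildren adjacency u = cs at hmem
    clear hcs h
    induction adjacency with
    | nil => cases hmem
    | cons a l ih =>
      simp only [List.foldr_cons]
      rcases List.mem_cons.1 hmem with h | h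
      · subst h; simp
      · exact le_trans (ih h) (le_max_right _ _)

theorem children_key (adjacency : List (Int × List Int)) (u : Int)
    (h : pvChildren adjacency u ≠ []) : u ∈ adjacency.map Prod.fst := by
  have := children_row adjacency u h
  exact List.mem_map.2 ⟨(u, pvChildren adjacency u), this, rfl⟩

theorem children_of_not_key (adjacency : List (Int × List Int)) (u : Int)
    (h : u ∉ adjacency.map Prod.fst) : pvChildren adjacency u = [] := by
  unfold pvChildren
  rw [PySem.Dict.getD_eq_get?_getD]
  have : (pvAdj adjacency).get? u = none := by
    rw [PySem.Dict.get?_eq_none_iff_not_mem_keys]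
    simpa [pvAdj, PySem.Dict.keys_mk] using h
  rw [this]
  rfl

-- preservation + value characterisation of A's recursion
theorem pv_pres (adjacency : List (Int × List Int)) (n_leaves : Int) : ∀ fuel : Nat,
    (∀ u memo m, dfsA adjacency n_leaves fuel u memo = some m →
      (∀ k, memo.contains k = true → m.get? k = memo.get? k ∧ m.contains k = true) ∧
      m.contains u = true) ∧
    (∀ cs memo s0 m' s', goA adjacency n_leaves fuel cs memo s0 = some (m', s') →
      (∀ k, memo.contains k = true → m'.get? k = memo.get? k ∧ m'.contains k = true) ∧
      (∀ v ∈ cs, m'.contains v = true) ∧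
      s' = cs.foldl (fun s v => PySem.Set.union s (m'.getD v [])) s0) := by
  intro fuel
  induction fuel with
  | zero =>
    constructor
    · intro u memo m h; simp [dfsA] at h
    · intro cs memo s0 m' s' h
      cases cs with
      | nil =>
        simp only [goA, Option.some.injEq, Prod.mk.injEq] at h
        obtain ⟨rfl, rfl⟩ := h
        exact ⟨fun k hk => ⟨rfl, hk⟩, by simp, rfl⟩
      | cons v vs => simp [goA] at h
  | succ f ih =>
    constructor
    · intro u memo m h
      simp only [dfsA] at h
      by_cases h1 : memo.contains u = true
      · rw [if_pos h1] at h
        obtain rfl : memo = m := by simpa using h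
        exact ⟨fun k hk => ⟨rfl, hk⟩, h1⟩
      · rw [if_neg h1] at h
        by_cases h2 : u < n_leaves
        · rw [if_pos h2] at h
          obtain rfl : memo.insert u [u] = m := by simpa using h
          refine ⟨fun k hk => ⟨?_, ?_⟩, PySem.Dict.contains_insert_self ..⟩
          · exact PySem.Dict.get?_insert_of_ne _ _ (fun e => h1 (by rw [← e]; exact hk))
          · rw [PySem.Dict.contains_insert]; simp [hk]
        · rw [if_neg h2] at h
          cases hg : goA adjacency n_leaves f (pvChildren adjacency u) memo [] with
          | none => rw [hg] at h; simp at h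
          | some p =>
            obtain ⟨mk, s⟩ := p
            rw [hg] at h
            obtain rfl : mk.insert u s = m := by simpa using h
            obtain ⟨hpres, -, -⟩ := ih.2 _ _ _ _ _ hg
            refine ⟨fun k hk => ⟨?_, ?_⟩, PySem.Dict.contains_insert_self ..⟩
            · rw [PySem.Dict.get?_insert_of_ne _ _ (fun e => h1 (by rw [← e]; exact hk))]
              exact (hpres k hk).1
            · rw [PySem.Dict.contains_insert]; simp [(hpres k hk).2]
    · intro cs memo s0 m' s' h
      cases cs with
      | nil =>
        simp only [goA, Option.some.injEq, Prod.mk.injEq] at h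
        obtain ⟨rfl, rfl⟩ := h
        exact ⟨fun k hk => ⟨rfl, hk⟩, by simp, rfl⟩
      | cons v vs =>
        simp only [goA] at h
        cases hd : dfsA adjacency n_leaves f v memo with
        | none => rw [hd] at h; simp at h
        | some m2 =>
          rw [hd] at h
          simp only at h
          obtain ⟨hpres1, hcv⟩ := ih.1 _ _ _ hd
          obtain ⟨hpres2, hcs, hs⟩ := ih.2 _ _ _ _ _ h
          have hvv : m'.getD v [] = m2.getD v [] := by
            rw [PySem.Dict.getD_eq_get?_getD, PySem.Dict.getD_eq_get?_getD,
              (hpres2 v hcv).1]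
          refine ⟨fun k hk => ?_, fun w hw => ?_, ?_⟩
          · obtain ⟨e1, c1⟩ := hpres1 k hk
            obtain ⟨e2, c2⟩ := hpres2 k c1
            exact ⟨e2.trans e1, c2⟩
          · rcases List.mem_cons.1 hw with rfl | hw
            · exact (hpres2 w hcv).2
            · exact hcs w hw
          · rw [hs, List.foldl_cons, hvv]

theorem runB_mono (adjacency : List (Int × List Int)) (n_leaves : Int) : ∀ fuel g : Nat, fuel ≤ g →
    ∀ st pending memo m, runB adjacency n_leaves fuel st pending memo = some m →
      runB adjacency n_leaves g st pending memo = some m := by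
  intro fuel
  induction fuel with
  | zero =>
    intro g _ st pending memo m h; simp [runB] at h
  | succ f ih =>
    intro g hg st pending memo m h
    obtain ⟨g', rfl⟩ : ∃ g', g = g' + 1 := ⟨g - 1, by omega⟩
    have hfg : f ≤ g' := by omega
    cases st with
    | nil => simpa [runB] using h
    | cons e st =>
      obtain ⟨u, ready⟩ := e
      simp only [runB] at h ⊢
      by_cases h1 : ready = true
      · rw [if_pos h1] at h ⊢
        cases hc : collectB memo (pvChildren adjacency u) [] with
        | none => rw [hc] at h; simp at h
        | some s =>
          simp only [hc] at h ⊢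
          exact ih g' hfg _ _ _ _ h
      · rw [if_neg h1] at h ⊢
        by_cases h2 : memo.contains u = true
        · rw [if_pos h2] at h ⊢; exact ih g' hfg _ _ _ _ h
        · rw [if_neg h2] at h ⊢
          by_cases h3 : pending.contains u = true
          · rw [if_pos h3] at h; simp at h
          · rw [if_neg h3] at h ⊢
            by_cases h4 : u < n_leaves
            · rw [if_pos h4] at h ⊢; exact ih g' hfg _ _ _ _ h
            · rw [if_neg h4] at h ⊢; exact ih g' hfg _ _ _ _ h

-- a node that is not internal succeeds within 1 unit of A-fuel
theorem dfsA_terminal (adjacency : List (Int × List Int)) (n_leaves u : Int)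
    (h : ¬ pvInternal adjacency n_leaves u) (memo : PySem.Dict Int (List Int))
    (fuel : Nat) (hf : 1 ≤ fuel) : (dfsA adjacency n_leaves fuel u memo).isSome := by
  obtain ⟨f, rfl⟩ : ∃ f, fuel = f + 1 := ⟨fuel - 1, by omega⟩
  simp only [dfsA]
  by_cases h1 : memo.contains u = true
  · rw [if_pos h1]; rfl
  · rw [if_neg h1]
    by_cases h2 : u < n_leaves
    · rw [if_pos h2]; rfl
    · rw [if_neg h2]
      have hk : u ∉ adjacency.map Prod.fst := by
        intro hk
        exact h ⟨hk, by omega⟩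
      rw [children_of_not_key adjacency u hk]
      have hgo : goA adjacency n_leaves f ([] : List Int) memo [] = some (memo, []) := by
        cases f <;> rfl
      rw [hgo]
      rfl

-- the children loop terminates given fuel for each child
theorem goA_term (adjacency : List (Int × List Int)) (n_leaves : Int) (C : Nat) (hC : 1 ≤ C) :
    ∀ cs : List Int,
      (∀ v ∈ cs, ∀ (memo : PySem.Dict Int (List Int)) (fuel : Nat), C ≤ fuel →
        (dfsA adjacency n_leaves fuel v memo).isSome) →
      ∀ (memo : PySem.Dict Int (List Int)) (s0 : PySem.Set Int) (fuel : Nat),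
        C + cs.length ≤ fuel → (goA adjacency n_leaves fuel cs memo s0).isSome := by
  intro cs
  induction cs with
  | nil =>
    intro _ memo s0 fuel _
    cases fuel <;> simp [goA]
  | cons v vs ih =>
    intro hcs memo s0 fuel hf
    obtain ⟨f, rfl⟩ : ∃ f, fuel = f + 1 := ⟨fuel - 1, by omega⟩
    simp only [goA]
    have h1 : (dfsA adjacency n_leaves f v memo).isSome :=
      hcs v (List.mem_cons_self ..) memo f (by simp at hf; omega)
    cases hd : dfsA adjacency n_leaves f v memo with
    | none => rw [hd] at h1; simp at h1
    | some m2 =>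
      simp only
      exact ih (fun w hw => hcs w (List.mem_cons_of_mem _ hw)) m2 _ f (by simp at hf ⊢; omega)

-- A terminates within fuel (L+2)^(μ u + 1) under Pre_
theorem dfsA_term (adjacency : List (Int × List Int)) (n_leaves : Int)
    (pre : Pre_compute_leaf_sets_py adjacency n_leaves) :
    ∀ N : Nat, ∀ u : Int, pvMu adjacency n_leaves u < N →
      ∀ (memo : PySem.Dict Int (List Int)) (fuel : Nat),
        (pvMaxRow adjacency + 2) ^ (pvMu adjacency n_leaves u + 1) ≤ fuel →
        (dfsA adjacency n_leaves fuel u memo).isSome := by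
  intro N
  induction N with
  | zero => intro u h; omega
  | succ N ih =>
    intro u hu memo fuel hf
    set L := pvMaxRow adjacency with hL
    have hpow1 : 1 ≤ (L + 2) ^ (pvMu adjacency n_leaves u + 1) := Nat.one_le_pow _ _ (by omega)
    by_cases hint : pvInternal adjacency n_leaves u
    · obtain ⟨f, rfl⟩ : ∃ f, fuel = f + 1 := ⟨fuel - 1, by omega⟩
      simp only [dfsA]
      by_cases h1 : memo.contains u = true
      · rw [if_pos h1]; rfl
      · rw [if_neg h1]
        by_cases h2 : u < n_leaves
        · rw [if_pos h2]; rfl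
        · rw [if_neg h2]
          have hgo : (goA adjacency n_leaves f (pvChildren adjacency u) memo []).isSome := by
            apply goA_term adjacency n_leaves ((L + 2) ^ pvMu adjacency n_leaves u)
              (Nat.one_le_pow _ _ (by omega))
            · intro v hv memo' fuel' hf'
              by_cases hv2 : pvInternal adjacency n_leaves v
              · have hmu : pvMu adjacency n_leaves v < pvMu adjacency n_leaves u :=
                  pvEdge_mu_lt adjacency n_leaves pre u v hint hv2 hv
                apply ih v (by omega) memo' fuel'
                calc (L + 2) ^ (pvMu adjacency n_leaves v + 1)
                    ≤ (L + 2) ^ pvMu adjacency n_leaves u :=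
                      Nat.pow_le_pow_right (by omega) (by omega)
                  _ ≤ fuel' := hf'
              · exact dfsA_terminal adjacency n_leaves v hv2 memo' fuel'
                  (le_trans (Nat.one_le_pow _ _ (by omega)) hf')
            · have hlen : (pvChildren adjacency u).length ≤ L := children_len_le adjacency u
              have hkey : (L + 2) ^ (pvMu adjacency n_leaves u + 1) =
                  (L + 2) ^ pvMu adjacency n_leaves u * (L + 2) := by
                rw [pow_succ]
              have h3 : 1 ≤ (L + 2) ^ pvMu adjacency n_leaves u := Nat.one_le_pow _ _ (by omega)
              nlinarith [hf, hlen, h3, hkey]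
          cases hgoe : goA adjacency n_leaves f (pvChildren adjacency u) memo [] with
          | none => simp [hgoe] at hgo
          | some p => cases p; rfl
    · exact dfsA_terminal adjacency n_leaves u hint memo fuel (by omega)

theorem collectB_of_contains (memo : PySem.Dict Int (List Int)) :
    ∀ (cs : List Int) (s0 : PySem.Set Int), (∀ v ∈ cs, memo.contains v = true) →
      collectB memo cs s0 =
        some (cs.foldl (fun s v => PySem.Set.union s (memo.getD v [])) s0) := by
  intro cs
  induction cs with
  | nil => intro s0 _; rfl
  | cons v vs ih =>
    intro s0 hc
    have hv : memo.contains v = true := hc v (List.mem_cons_self ..)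
    rw [PySem.Dict.contains_eq_isSome_get?] at hv
    cases hg : memo.get? v with
    | none => rw [hg] at hv; simp at hv
    | some w =>
      simp only [collectB, hg]
      rw [ih _ (fun x hx => hc x (List.mem_cons_of_mem _ hx))]
      simp only [List.foldl_cons]
      congr 2
      rw [PySem.Dict.getD_eq_get?_getD, hg]
      rfl

theorem discard_add_self (p : PySem.Set Int) (u : Int) (h : u ∉ p) :
    PySem.Set.discard (PySem.Set.add p u) u = p := by
  rw [PySem.Set.add_of_not_mem h]
  show List.filter _ _ = _
  rw [List.filter_append]
  have h2 : List.filter (fun y => !y == u) [u] = [] := by simp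
  rw [h2, List.append_nil]
  apply List.filter_eq_self.2
  intro a ha
  simp only [ne_eq, Bool.not_eq_eq_eq_not, Bool.not_true, beq_eq_false_iff_ne]
  exact fun e => h (e ▸ ha)

-- terminal nodes: B simulates one dfs call at cost 2
theorem simB_terminal (adjacency : List (Int × List Int)) (n_leaves u : Int)
    (h : ¬ pvInternal adjacency n_leaves u) :
    ∀ (fuel : Nat) (memo m : PySem.Dict Int (List Int)),
      dfsA adjacency n_leaves fuel u memo = some m →
      ∀ (p : PySem.Set Int), u ∉ p →
      ∀ (st : List (Int × Bool)) (g : Nat) (res : PySem.Dict Int (List Int)),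
        runB adjacency n_leaves g st p m = some res →
        runB adjacency n_leaves (2 + g) ((u, false) :: st) p memo = some res := by
  intro fuel memo m hd p hp st g res hr
  obtain ⟨f, rfl⟩ : ∃ f, fuel = f + 1 := by
    cases fuel with
    | zero => simp [dfsA] at hd
    | succ f => exact ⟨f, rfl⟩
  have hpc : p.contains u = false := by
    rw [Bool.eq_false_iff]
    exact fun hc => hp ((PySem.Set.contains_iff p u).1 hc)
  simp only [dfsA] at hd
  have h21 : 2 + g = (1 + g) + 1 := by omega
  by_cases h1 : memo.contains u = true
  · rw [if_pos h1] at hd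
    obtain rfl : memo = m := by simpa using hd
    rw [h21]
    simp only [runB, if_neg (Bool.false_ne_true), if_pos h1]
    exact runB_mono adjacency n_leaves g (1 + g) (by omega) _ _ _ _ hr
  · rw [if_neg h1] at hd
    by_cases h2 : u < n_leaves
    · rw [if_pos h2] at hd
      obtain rfl : memo.insert u [u] = m := by simpa using hd
      rw [h21]
      simp only [runB, if_neg h1, hpc, if_neg (Bool.false_ne_true), if_pos h2]
      exact runB_mono adjacency n_leaves g (1 + g) (by omega) _ _ _ _ hr
    · rw [if_neg h2] at hd
      have hk : u ∉ adjacency.map Prod.fst := fun hk => h ⟨hk, by omega⟩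
      have hch : pvChildren adjacency u = [] := children_of_not_key adjacency u hk
      rw [hch] at hd
      have hgo : goA adjacency n_leaves f ([] : List Int) memo [] = some (memo, []) := by
        cases f <;> rfl
      rw [hgo] at hd
      obtain rfl : memo.insert u [] = m := by simpa using hd
      rw [h21]
      simp only [runB, if_neg h1, hpc, if_neg (Bool.false_ne_true), if_neg h2, hch]
      simp only [List.map_nil, List.nil_append]
      have hcol : collectB memo ([] : List Int) [] = some [] := rfl
      have hdis : (PySem.Set.add p u).discard u = p := discard_add_self p u hp
      have h1g : 1 + g = g + 1 := by omega
      rw [h1g]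
      simp only [runB, hch, hcol, hdis, if_pos]
      exact hr

-- B processes a pushed children segment exactly as A's children loop does
theorem simB_list (adjacency : List (Int × List Int)) (n_leaves : Int)
    (q : PySem.Set Int) (C : Nat) :
    ∀ cs : List Int,
      (∀ v ∈ cs, ∀ (fuel : Nat) (memo m : PySem.Dict Int (List Int)),
        dfsA adjacency n_leaves fuel v memo = some m →
        ∀ (st : List (Int × Bool)) (g : Nat) (res : PySem.Dict Int (List Int)),
          runB adjacency n_leaves g st q m = some res →
          runB adjacency n_leaves (C + g) ((v, false) :: st) q memo = some res) →
      ∀ (fuel : Nat) (memo : PySem.Dict Int (List Int)) (s0 : PySem.Set Int)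
        (mk : PySem.Dict Int (List Int)) (s : PySem.Set Int),
        goA adjacency n_leaves fuel cs memo s0 = some (mk, s) →
        ∀ (st : List (Int × Bool)) (g : Nat) (res : PySem.Dict Int (List Int)),
          runB adjacency n_leaves g st q mk = some res →
          runB adjacency n_leaves (cs.length * C + g)
            (cs.map (fun v => (v, false)) ++ st) q memo = some res := by
  intro cs
  induction cs with
  | nil =>
    intro _ fuel memo s0 mk s hgo st g res hr
    have : memo = mk := by
      cases fuel <;> · simp only [goA, Option.some.injEq, Prod.mk.injEq] at hgo; exact hgo.1
    subst this
    simpa using hr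
  | cons v vs ih =>
    intro HS fuel memo s0 mk s hgo st g res hr
    obtain ⟨f, rfl⟩ : ∃ f, fuel = f + 1 := by
      cases fuel with
      | zero => simp [goA] at hgo
      | succ f => exact ⟨f, rfl⟩
    simp only [goA] at hgo
    cases hd : dfsA adjacency n_leaves f v memo with
    | none => rw [hd] at hgo; simp at hgo
    | some m2 =>
      rw [hd] at hgo
      simp only at hgo
      have hih := ih (fun w hw => HS w (List.mem_cons_of_mem _ hw)) f m2 _ mk s hgo st g res hr
      have hfin := HS v (List.mem_cons_self ..) f memo m2 hd _ _ _ hih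
      have harith : C + (vs.length * C + g) = (v :: vs).length * C + g := by
        simp [Nat.succ_mul]; ring
      rw [harith] at hfin
      simpa using hfin


-- the simulation: B's stack loop computes exactly what A's dfs computes
theorem simB (adjacency : List (Int × List Int)) (n_leaves : Int)
    (pre : Pre_compute_leaf_sets_py adjacency n_leaves) :
    ∀ N : Nat, ∀ u : Int, pvMu adjacency n_leaves u < N →
      ∀ (fuel : Nat) (memo m : PySem.Dict Int (List Int)),
        dfsA adjacency n_leaves fuel u memo = some m →
        ∀ (p : PySem.Set Int),
          (∀ w ∈ p, pvInternal adjacency n_leaves w ∧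
            pvMu adjacency n_leaves u < pvMu adjacency n_leaves w) →
        ∀ (st : List (Int × Bool)) (g : Nat) (res : PySem.Dict Int (List Int)),
          runB adjacency n_leaves g st p m = some res →
          runB adjacency n_leaves
              ((pvMaxRow adjacency + 2) ^ (pvMu adjacency n_leaves u + 2) + g)
              ((u, false) :: st) p memo = some res := by
  intro N
  induction N with
  | zero => intro u h; omega
  | succ N ih =>
    intro u hu fuel memo m hd p hp st g res hr
    set L := pvMaxRow adjacency with hL
    set μ := pvMu adjacency n_leaves u with hμ
    have hup : u ∉ p := fun hu' => by have := (hp u hu').2; omega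
    have hpc : p.contains u = false := by
      rw [Bool.eq_false_iff]
      exact fun hc => hup ((PySem.Set.contains_iff p u).1 hc)
    have hpow1 : 1 ≤ (L + 2) ^ (μ + 2) := Nat.one_le_pow _ _ (by omega)
    obtain ⟨f, rfl⟩ : ∃ f, fuel = f + 1 := by
      cases fuel with
      | zero => simp [dfsA] at hd
      | succ f => exact ⟨f, rfl⟩
    obtain ⟨d, hdd, hgd⟩ : ∃ d, (L + 2) ^ (μ + 2) + g = d + 1 ∧ g ≤ d :=
      ⟨(L + 2) ^ (μ + 2) + g - 1, by omega, by omega⟩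
    simp only [dfsA] at hd
    by_cases h1 : memo.contains u = true
    · rw [if_pos h1] at hd
      obtain rfl : memo = m := by simpa using hd
      rw [hdd]
      simp only [runB, if_neg (Bool.false_ne_true), if_pos h1]
      exact runB_mono adjacency n_leaves g d hgd _ _ _ _ hr
    · rw [if_neg h1] at hd
      by_cases h2 : u < n_leaves
      · rw [if_pos h2] at hd
        obtain rfl : memo.insert u [u] = m := by simpa using hd
        rw [hdd]
        simp only [runB, if_neg h1, hpc, if_neg (Bool.false_ne_true), if_pos h2]
        exact runB_mono adjacency n_leaves g d hgd _ _ _ _ hr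
      · rw [if_neg h2] at hd
        cases hgo : goA adjacency n_leaves f (pvChildren adjacency u) memo [] with
        | none => rw [hgo] at hd; simp at hd
        | some pr =>
          obtain ⟨mk, s⟩ := pr
          rw [hgo] at hd
          obtain rfl : mk.insert u s = m := by simpa using hd
          obtain ⟨-, hcsmem, hsval⟩ :=
            (pv_pres adjacency n_leaves f).2 _ _ _ _ _ hgo
          have hstep : runB adjacency n_leaves (g + 1) ((u, true) :: st)
              (PySem.Set.add p u) mk = some res := by
            simp only [runB]
            rw [collectB_of_contains mk (pvChildren adjacency u) [] hcsmem]
            simp only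
            rw [discard_add_self p u hup, ← hsval]
            exact hr
          set C := (L + 2) ^ (μ + 1) with hC
          have hseg : runB adjacency n_leaves
              ((pvChildren adjacency u).length * C + (g + 1))
              ((pvChildren adjacency u).map (fun v => (v, false)) ++ (u, true) :: st)
              (PySem.Set.add p u) memo = some res := by
            apply simB_list adjacency n_leaves (PySem.Set.add p u) C _
              (fun w hw => ?_) f memo [] mk s hgo _ _ _ hstep
            intro fuel' memo' m' hd' st' g' res' hr'
            have hintu : pvInternal adjacency n_leaves u :=
              ⟨children_key adjacency u (by intro e; rw [e] at hw; cases hw), by omega⟩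
            by_cases hw2 : pvInternal adjacency n_leaves w
            · have hmu : pvMu adjacency n_leaves w < μ :=
                pvEdge_mu_lt adjacency n_leaves pre u w hintu hw2 hw
              have hq : ∀ x ∈ PySem.Set.add p u,
                  pvInternal adjacency n_leaves x ∧
                  pvMu adjacency n_leaves w < pvMu adjacency n_leaves x := by
                intro x hx
                rcases (PySem.Set.mem_add p u x).1 hx with hx | rfl
                · exact ⟨(hp x hx).1, lt_trans hmu (hp x hx).2⟩
                · exact ⟨hintu, hmu⟩
              have hw3 := ih w (by omega) fuel' memo' m' hd' (PySem.Set.add p u) hq st' g' res' hr'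
              refine runB_mono adjacency n_leaves _ (C + g') ?_ _ _ _ _ hw3
              have : (L + 2) ^ (pvMu adjacency n_leaves w + 2) ≤ C :=
                Nat.pow_le_pow_right (by omega) (by omega)
              omega
            · have hwq : w ∉ PySem.Set.add p u := by
                intro hx
                rcases (PySem.Set.mem_add p u w).1 hx with hx | rfl
                · exact hw2 (hp w hx).1
                · exact hw2 hintu
              have hw3 := simB_terminal adjacency n_leaves w hw2 fuel' memo' m' hd'
                (PySem.Set.add p u) hwq st' g' res' hr'
              refine runB_mono adjacency n_leaves _ (C + g') ?_ _ _ _ _ hw3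
              have h2C : 2 ≤ C := by
                calc 2 ≤ L + 2 := by omega
                  _ = (L + 2) ^ 1 := (pow_one _).symm
                  _ ≤ (L + 2) ^ (μ + 1) := Nat.pow_le_pow_right (by omega) (by omega)
              omega
          rw [hdd]
          simp only [runB, if_neg h1, hpc, if_neg (Bool.false_ne_true), if_neg h2]
          refine runB_mono adjacency n_leaves _ d ?_ _ _ _ _ hseg
          have hlen : (pvChildren adjacency u).length ≤ L := children_len_le adjacency u
          have hCle : 1 ≤ C := Nat.one_le_pow _ _ (by omega)
          have hkey : (L + 2) ^ (μ + 2) = (L + 2) ^ (μ + 1) * (L + 2) := by rw [pow_succ]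
          nlinarith [hdd, hlen, hCle, hkey]

-- per node of the outer loop, the two programs take the same option step
theorem per_node (adjacency : List (Int × List Int)) (n_leaves : Int)
    (pre : Pre_compute_leaf_sets_py adjacency n_leaves)
    (memo : PySem.Dict Int (List Int)) (node : Int) :
    dfsA adjacency n_leaves (pvFuelA adjacency) node memo =
      (if memo.contains node then some memo
       else runB adjacency n_leaves (pvFuelB adjacency) [(node, false)] [] memo) := by
  have hfa1 : 1 ≤ pvFuelA adjacency := Nat.one_le_pow _ _ (by omega)
  by_cases h1 : memo.contains node = true
  · rw [if_pos h1]
    obtain ⟨f, hf⟩ : ∃ f, pvFuelA adjacency = f + 1 := ⟨pvFuelA adjacency - 1, by omega⟩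
    rw [hf]
    simp [dfsA, h1]
  · rw [if_neg h1]
    have hμn : pvMu adjacency n_leaves node ≤ adjacency.length := pvMu_le_len adjacency n_leaves node
    have hterm : (dfsA adjacency n_leaves (pvFuelA adjacency) node memo).isSome := by
      apply dfsA_term adjacency n_leaves pre (pvMu adjacency n_leaves node + 1) node (by omega)
      unfold pvFuelA
      exact Nat.pow_le_pow_right (by omega) (by omega)
    cases hd : dfsA adjacency n_leaves (pvFuelA adjacency) node memo with
    | none => rw [hd] at hterm; simp at hterm
    | some m =>
      have hbase : runB adjacency n_leaves 1 [] ([] : PySem.Set Int) m = some m := rfl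
      have hsim := simB adjacency n_leaves pre (pvMu adjacency n_leaves node + 1) node
        (by omega) (pvFuelA adjacency) memo m hd [] (by simp) [] 1 m hbase
      symm
      refine runB_mono adjacency n_leaves _ (pvFuelB adjacency) ?_ _ _ _ _ hsim
      unfold pvFuelB
      set L := pvMaxRow adjacency
      have h2 : (L + 2) ^ (pvMu adjacency n_leaves node + 2) ≤ (L + 2) ^ (adjacency.length + 2) :=
        Nat.pow_le_pow_right (by omega) (by omega)
      have h3 : (L + 2) ^ (adjacency.length + 3) = (L + 2) ^ (adjacency.length + 2) * (L + 2) := by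
        rw [pow_succ]
      have h4 : 1 ≤ (L + 2) ^ (adjacency.length + 2) := Nat.one_le_pow _ _ (by omega)
      nlinarith [h2, h3, h4]

theorem compute_leaf_sets_py_spec : Claim_equal_compute_leaf_sets_py := by
  intro adjacency n_leaves _ pre
  unfold Spec_compute_leaf_sets_py
  unfold compute_leaf_sets_py compute_leaf_sets_py_alt
  have hfold : ∀ (l : List Int) (acc : Option (PySem.Dict Int (List Int))),
      l.foldl (fun acc node => acc.bind
        (fun memo => dfsA adjacency n_leaves (pvFuelA adjacency) node memo)) acc =
      l.foldl (fun acc node => acc.bind (fun memo =>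
        if memo.contains node then some memo
        else runB adjacency n_leaves (pvFuelB adjacency) [(node, false)] [] memo)) acc := by
    intro l
    induction l with
    | nil => intro acc; rfl
    | cons v l ih =>
      intro acc
      simp only [List.foldl_cons]
      rw [← ih]
      congr 1
      cases acc with
      | none => rfl
      | some memo =>
        simp only [Option.bind_some]
        exact per_node adjacency n_leaves pre memo v
  rw [hfold]
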